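-- pv_equiv track=rewrite | github.com/Priya2410/Competetive_Programming | BinarySearch.com/highFreq.py | solve
-- ===== SOURCE A (Python) =====
-- def solve(nums):
--     d=dict()
--     maxval=0
--     for i in set(nums):
--         d[i]=0
--     for j in range(0,len(nums)):
--         d[nums[j]]=d[nums[j]]+1
--         if(d[nums[j]]>maxval):
--             maxval=d[nums[j]]
--     return maxval;
-- ===== SOURCE B (Python) =====
-- def solve(nums):
--     s = sorted(nums)
--     best = 0
--     run = 0
--     prev = None
--     for x in s:
--         run = run + 1 if prev == x else 1
--         if run > best:
--             best = run
--         prev = x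
--     return best
-- ===== Notes on version B (the rewrite author's own statement) =====
-- stated objective: alternative
-- what changed: Replaces the dict-of-counts with inline max by sort-a-copy then one scan for the longest run of equal elements.
import Mathlib
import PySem

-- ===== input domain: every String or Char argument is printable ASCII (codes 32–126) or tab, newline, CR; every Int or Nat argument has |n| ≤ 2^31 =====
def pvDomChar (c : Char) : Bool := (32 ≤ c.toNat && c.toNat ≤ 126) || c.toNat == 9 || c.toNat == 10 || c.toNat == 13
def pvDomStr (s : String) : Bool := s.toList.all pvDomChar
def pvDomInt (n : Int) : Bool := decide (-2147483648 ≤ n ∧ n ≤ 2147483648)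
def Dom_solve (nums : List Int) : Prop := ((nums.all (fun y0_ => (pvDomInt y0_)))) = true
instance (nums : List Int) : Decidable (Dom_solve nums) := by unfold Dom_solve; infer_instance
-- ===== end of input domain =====

-- B replaces A's dict-of-counts with sort-a-copy-then-longest-equal-run: an alternative algorithm of similar cost.

-- ===== PORT A =====
def solve (nums : List Int) : Int :=
  let d : PySem.Dict Int Int :=
    (PySem.Set.ofList nums).foldl (fun d i => d.insert i 0) PySem.Dict.empty
  let st :=
    (PySem.List.pyRange 0 (PySem.List.len nums) 1).foldl
      (fun (st : PySem.Dict Int Int × Int) j =>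
        let x := PySem.List.pyGetD nums j 0   -- nums[j], j always in range
        let d := st.1.insert x (st.1.getD x 0 + 1)
        let c := d.getD x 0
        (d, if c > st.2 then c else st.2))
      (d, 0)
  st.2

-- ===== PORT B =====
def solve_alt (nums : List Int) : Int :=
  let s := PySem.List.sorted nums (fun x => x) false
  let st :=
    s.foldl
      (fun (st : Int × Int × Option Int) x =>
        let run := if st.2.2 = some x then st.2.1 + 1 else 1
        let best := if run > st.1 then run else st.1
        (best, run, some x))
      (0, 0, none)
  st.1

-- ===== PRECONDITION & SPEC =====
def Spec_solve (nums : List Int) (out : Int) : Prop := out = solve_alt nums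
instance (nums : List Int) (out : Int) : Decidable (Spec_solve nums out) := by unfold Spec_solve; infer_instance

-- ===== CLAIM (what is proved, stated in full; the proofs are below) =====
def Claim_equal_solve : Prop := ∀ (nums : List Int), Dom_solve nums → Spec_solve nums (solve nums)

-- ===== LEMMAS AND PROOFS =====

-- the common value both programs compute: the maximum multiplicity of any element
def maxCount (p : List Int) : Nat := p.toFinset.sup (fun x => p.count x)

lemma maxCount_append_singleton (p : List Int) (x : Int) :
    maxCount (p ++ [x]) = max (maxCount p) (p.count x + 1) := by
  unfold maxCount
  apply le_antisymm
  · apply Finset.sup_le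
    intro y hy
    rcases eq_or_ne y x with rfl | hne
    · have : (p ++ [y]).count y = p.count y + 1 := by
        simp [List.count_append]
      rw [this]; exact le_max_of_le_right (by omega)
    · have hyp : y ∈ p.toFinset := by
        simp only [List.mem_toFinset, List.mem_append, List.mem_singleton] at hy ⊢
        tauto
      have : (p ++ [x]).count y = p.count y := by
        simp [List.count_append, hne.symm]
      rw [this]
      exact le_max_of_le_left (Finset.le_sup (f := fun z => p.count z) hyp)
  · apply max_le
    · apply Finset.sup_le
      intro y hy
      have hy' : y ∈ (p ++ [x]).toFinset := by
        simp only [List.mem_toFinset, List.mem_append] at hy ⊢; tauto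
      calc p.count y ≤ (p ++ [x]).count y := by simp [List.count_append]
        _ ≤ _ := Finset.le_sup (f := fun z => (p ++ [x]).count z) hy'
    · have hx : x ∈ (p ++ [x]).toFinset := by simp
      have h2 : (p ++ [x]).count x = p.count x + 1 := by simp [List.count_append]
      calc p.count x + 1 = (p ++ [x]).count x := h2.symm
        _ ≤ _ := Finset.le_sup (f := fun z => (p ++ [x]).count z) hx

lemma maxCount_perm {p q : List Int} (h : p.Perm q) : maxCount p = maxCount q := by
  unfold maxCount
  have ht : p.toFinset = q.toFinset := by
    ext x; simp [List.mem_toFinset, h.mem_iff]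
  rw [ht]
  exact Finset.sup_congr rfl (fun x _ => h.count_eq x)

-- ----- A side -----

lemma A_init_gen (s : List Int) : ∀ (d : PySem.Dict Int Int),
    (∀ x, d.getD x 0 = 0) → ∀ x, ((s.foldl (fun d i => d.insert i 0) d).getD x 0) = 0 := by
  induction s with
  | nil => intro d h x; exact h x
  | cons i s ih =>
    intro d h x
    simp only [List.foldl_cons]
    apply ih
    intro y
    rw [PySem.Dict.getD_insert]
    split <;> simp [h]

lemma A_loop (l : List Int) : ∀ (p : List Int) (d : PySem.Dict Int Int) (m : Int),
    (∀ x, d.getD x 0 = (p.count x : Int)) → m = (maxCount p : Int) →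
    (l.foldl (fun (st : PySem.Dict Int Int × Int) x =>
        let d := st.1.insert x (st.1.getD x 0 + 1)
        let c := d.getD x 0
        (d, if c > st.2 then c else st.2)) (d, m)).2 = (maxCount (p ++ l) : Int) := by
  induction l with
  | nil => intro p d m _ hm; simpa using hm
  | cons x l ih =>
    intro p d m hd hm
    simp only [List.foldl_cons]
    have hc : (d.insert x (d.getD x 0 + 1)).getD x 0 = (p.count x : Int) + 1 := by
      rw [PySem.Dict.getD_insert_self, hd]
    have hstate : ∀ y, (d.insert x (d.getD x 0 + 1)).getD y 0 = ((p ++ [x]).count y : Int) := by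
      intro y
      rw [PySem.Dict.getD_insert]
      rcases eq_or_ne y x with rfl | hne
      · simp [hd, List.count_append]
      · simp [hne, hd, List.count_append, hne.symm]
    have hm' : (if (d.insert x (d.getD x 0 + 1)).getD x 0 > m then (d.insert x (d.getD x 0 + 1)).getD x 0 else m)
        = (maxCount (p ++ [x]) : Int) := by
      rw [hc, hm, maxCount_append_singleton]
      push_cast
      omega
    have := ih (p ++ [x]) (d.insert x (d.getD x 0 + 1)) _ hstate hm'
    simpa [List.append_assoc] using this

lemma solve_eq_maxCount (nums : List Int) : solve nums = (maxCount nums : Int) := by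
  unfold solve
  dsimp only
  rw [PySem.List.foldl_pyRange_zero_pyGetD nums 0
       (fun (st : PySem.Dict Int Int × Int) x =>
        (st.1.insert x (st.1.getD x 0 + 1),
         if (st.1.insert x (st.1.getD x 0 + 1)).getD x 0 > st.2
         then (st.1.insert x (st.1.getD x 0 + 1)).getD x 0 else st.2))]
  have h0 : ∀ x, ((PySem.Set.ofList nums).foldl (fun d i => d.insert i 0)
      (PySem.Dict.empty : PySem.Dict Int Int)).getD x 0 = 0 :=
    A_init_gen _ _ (fun x => by simp [PySem.Dict.getD_empty])
  have := A_loop nums [] _ 0 (fun x => by simpa using h0 x) (by simp [maxCount])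
  simpa using this

-- ----- B side -----

lemma B_loop (l : List Int) : ∀ (p : List Int) (a best run : Int),
    (p ++ l).Pairwise (· ≤ ·) → a ∈ p → (∀ y ∈ p, y ≤ a) →
    run = (p.count a : Int) → best = (maxCount p : Int) →
    (l.foldl (fun (st : Int × Int × Option Int) x =>
        let run := if st.2.2 = some x then st.2.1 + 1 else 1
        let best := if run > st.1 then run else st.1
        (best, run, some x)) (best, run, some a)).1 = (maxCount (p ++ l) : Int) := by
  induction l with
  | nil => intro p a best run _ _ _ _ hb; simpa using hb
  | cons x l ih =>
    intro p a best run hpw ha hle hrun hbest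
    simp only [List.foldl_cons]
    have hax : a ≤ x := by
      rw [List.pairwise_append] at hpw
      exact hpw.2.2 a ha x (by simp)
    have hrun' : (if (some a : Option Int) = some x then run + 1 else 1)
        = ((p ++ [x]).count x : Int) := by
      rcases eq_or_ne a x with rfl | hne
      · simp [hrun, List.count_append]
      · have hx_notin : x ∉ p := by
          intro hx
          exact hne (le_antisymm hax (hle x hx))
        have : p.count x = 0 := List.count_eq_zero.mpr hx_notin
        simp [hne, List.count_append, this]
    set run' := if (some a : Option Int) = some x then run + 1 else 1 with hrdef
    have hbest' : (if run' > best then run' else best) = (maxCount (p ++ [x]) : Int) := by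
      rw [hrun', hbest, maxCount_append_singleton]
      have hcx : (p ++ [x]).count x = p.count x + 1 := by simp [List.count_append]
      rw [hcx]
      push_cast
      split_ifs <;> omega
    have hpw' : ((p ++ [x]) ++ l).Pairwise (· ≤ ·) := by
      simpa [List.append_assoc] using hpw
    have hmem : x ∈ p ++ [x] := by simp
    have hle' : ∀ y ∈ p ++ [x], y ≤ x := by
      intro y hy
      rcases List.mem_append.mp hy with h | h
      · exact le_trans (hle y h) hax
      · simp at h; omega
    have := ih (p ++ [x]) x _ _ hpw' hmem hle' hrun' hbest'
    simpa [List.append_assoc] using this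

lemma solve_alt_eq_maxCount (nums : List Int) : solve_alt nums = (maxCount nums : Int) := by
  unfold solve_alt
  dsimp only
  have hperm : (PySem.List.sorted nums (fun x => x) false).Perm nums :=
    PySem.List.sorted_perm nums (fun x => x) false
  rw [maxCount_perm hperm.symm]
  have hpw : (PySem.List.sorted nums (fun x => x) false).Pairwise (· ≤ ·) := by
    simpa using PySem.List.sorted_pairwise (xs := nums) (key := fun x => x)
  cases hs : PySem.List.sorted nums (fun x => x) false with
  | nil => simp [maxCount]
  | cons x t =>
    rw [hs] at hpw
    simp only [List.foldl_cons]
    have hm1 : maxCount [x] = 1 := by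
      have := maxCount_append_singleton [] x
      simpa [maxCount] using this
    have := B_loop t [x] x 1 1 (by simpa using hpw) (by simp) (by simp)
      (by simp) (by simp [hm1])
    simpa using this

-- ===== VERDICT (by name: the statement is the Claim_ definition above) =====
theorem solve_spec : Claim_equal_solve := by
  intro nums _
  unfold Spec_solve
  rw [solve_eq_maxCount, solve_alt_eq_maxCount]
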